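-- pv_equiv track=rewrite | github.com/Sanjanah8/Competitive-Coding | Skillrack/python/average/remove letters in vowel positions.py | process_string
-- ===== SOURCE A (Python) =====
-- def process_string(s):
--     if not (2 <= len(s) <= 50):
--         return "invalidinput"
--
--     vowels = "aeiouAEIOU"
--
--     # Find vowel positions in original string (1-based)
--     vowel_positions = [i+1 for i, ch in enumerate(s) if ch in vowels]
--
--     # Reverse the string
--     rev = list(s[::-1])
--
--     # Remove characters at vowel positions
--     result = "".join([ch for i, ch in enumerate(rev, start=1) if i not in vowel_positions])
--
--     return result
-- ===== SOURCE B (Python) =====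
-- def process_string(s):
--     n = len(s)
--     if not (2 <= n <= 50):
--         return "invalidinput"
--     vowels = "aeiouAEIOU"
--     # Mirror-index pass: position j of s survives in the answer exactly when its
--     # mirror character s[n-1-j] is not a vowel (since the answer is rev(s) filtered
--     # at vowel positions of s).  Collect the survivors of s in order, then one
--     # final reverse yields the reversed-string order A produces.  No reversed copy
--     # of s and no positions table are ever built.
--     out = []
--     for j in range(n):
--         if s[n-1-j] not in vowels:
--             out.append(s[j])
--     out.reverse()
--     return "".join(out)
-- ===== Notes on version B (the rewrite author's own statement) =====
-- stated objective: alternative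
-- what changed: B never builds the vowel-positions table or a reversed copy of the string: one index loop over s keeps s[j] when its mirror character s[n-1-j] is not a vowel, then a single final reverse of the accumulator produces A's reversed-order result.
import Mathlib
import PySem

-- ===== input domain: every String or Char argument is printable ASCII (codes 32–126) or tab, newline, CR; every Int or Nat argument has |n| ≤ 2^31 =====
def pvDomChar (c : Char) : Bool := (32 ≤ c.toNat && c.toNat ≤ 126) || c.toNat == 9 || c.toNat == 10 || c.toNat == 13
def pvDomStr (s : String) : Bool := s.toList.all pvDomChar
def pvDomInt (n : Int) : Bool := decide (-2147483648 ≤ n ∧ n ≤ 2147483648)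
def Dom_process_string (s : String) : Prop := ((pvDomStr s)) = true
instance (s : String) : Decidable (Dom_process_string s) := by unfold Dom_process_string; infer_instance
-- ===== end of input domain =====

-- B replaces A's staged "collect 1-based vowel positions, reverse, filter by list
-- membership" with a single mirror-indexed pass over s plus one final reverse;
-- no reversed copy of s and no positions table are built. Return value only.

-- ===== PORT A =====
def process_string (s : String) : String :=
  let cs := s.toList
  if ¬ (2 ≤ cs.length ∧ cs.length ≤ 50) then "invalidinput"
  else
    let vowels := "aeiouAEIOU".toList
    let vowel_positions : List Int :=
      (PySem.List.enumerate cs 0).filterMap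
        (fun p => if p.2 ∈ vowels then some (p.1 + 1) else none)
    let rev := cs.reverse
    String.ofList ((PySem.List.enumerate rev 1).filterMap
            (fun p => if p.1 ∉ vowel_positions then some p.2 else none))

-- ===== PORT B =====
def process_string_alt (s : String) : String :=
  let cs := s.toList
  let n := cs.length
  if ¬ (2 ≤ n ∧ n ≤ 50) then "invalidinput"
  else
    let vowels := "aeiouAEIOU".toList
    -- for j in range(n): if s[n-1-j] not in vowels: out.append(s[j])
    let out := (List.range n).foldl
      (fun acc j => if cs[n - 1 - j]! ∉ vowels then acc ++ [cs[j]!] else acc) []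
    -- out.reverse(); "".join(out)
    String.ofList out.reverse

-- ===== PRECONDITION & SPEC =====
def Spec_process_string (s : String) (out : String) : Prop := out = process_string_alt s
instance (s : String) (out : String) : Decidable (Spec_process_string s out) := by unfold Spec_process_string; infer_instance

-- ===== CLAIM (what is proved, stated in full; the proofs are below) =====
def Claim_equal_process_string : Prop := ∀ (s : String), Dom_process_string s → Spec_process_string s (process_string s)

-- ===== LEMMAS AND PROOFS =====

-- A's membership test against the positions list, characterised by index.
lemma mem_positions (cs vs : List Char) (i : Int) :
    i ∈ (PySem.List.enumerate cs 0).filterMap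
        (fun p => if p.2 ∈ vs then some (p.1 + 1) else none) ↔
      ∃ k : Nat, ∃ _ : k < cs.length, i = (k : Int) + 1 ∧ cs[k] ∈ vs := by
  simp only [List.mem_filterMap, PySem.List.mem_enumerate_iff]
  constructor
  · rintro ⟨⟨j, c⟩, ⟨k, hk, hp⟩, hif⟩
    cases hp
    by_cases h : cs[k] ∈ vs
    · simp [h] at hif; exact ⟨k, hk, by omega, h⟩
    · simp [h] at hif
  · rintro ⟨k, hk, hi, hv⟩
    exact ⟨(k, cs[k]), ⟨k, hk, by simp⟩, by simp [hv, hi]⟩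

-- A's enumerate-filter equals filtering a zip of the two strings.
lemma A_zip_lemma (vs : List Char) (pos : List Int) :
    ∀ (ys xs : List Char) (n : Int),
      ys.length ≤ xs.length →
      (∀ k : Nat, ∀ _ : k < ys.length, ((n + k) ∈ pos ↔ xs[k]! ∈ vs)) →
      (PySem.List.enumerate ys n).filterMap
          (fun p => if p.1 ∉ pos then some p.2 else none)
        = (xs.zip ys).filterMap (fun p => if p.1 ∉ vs then some p.2 else none) := by
  intro ys
  induction ys with
  | nil => intro xs n _ _; simp [PySem.List.enumerate]
  | cons c ys ih =>
    intro xs n hlen hiff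
    cases xs with
    | nil => simp at hlen
    | cons x xs =>
      have h0 := hiff 0 (by simp)
      simp only [List.getElem!_cons_zero, Int.natCast_zero, add_zero] at h0
      rw [PySem.List.enumerate_cons]
      simp only [List.zip_cons_cons, List.filterMap_cons]
      have hrec := ih xs (n + 1) (by simpa using hlen)
        (fun k hk => by
          have := hiff (k + 1) (by simpa using hk)
          simpa [List.getElem!_cons_succ, add_assoc, add_comm, add_left_comm] using this)
      by_cases hx : x ∈ vs
      · have hn : n ∈ pos := h0.mpr hx
        simp only [hn, hx]
        simpa using hrec
      · have hn : n ∉ pos := fun h => hx (h0.mp h)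
        simp only [hn, hx]
        simp only [not_false_eq_true, if_true, List.cons.injEq, true_and]
        simpa using hrec

-- B's append-accumulator loop is a filterMap.
lemma foldl_append_if' {α β : Type} (p : α → Prop) [DecidablePred p] (f : α → β) :
    ∀ (l : List α) (acc : List β),
      l.foldl (fun acc j => if p j then acc ++ [f j] else acc) acc
        = acc ++ l.filterMap (fun j => if p j then some (f j) else none) := by
  intro l
  induction l with
  | nil => simp
  | cons a l ih =>
    intro acc
    simp only [List.foldl_cons, List.filterMap_cons]
    by_cases h : p a <;> simp [h, ih]

-- reverse of range by the mirror map.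
lemma reverse_range_eq_map (n : Nat) :
    (List.range n).reverse = (List.range n).map (fun j => n - 1 - j) := by
  induction n with
  | zero => simp
  | succ n ih =>
    conv_lhs => rw [List.range_succ]
    conv_rhs => rw [List.range_succ_eq_map]
    rw [List.reverse_append, List.map_cons, List.map_map]
    simp only [List.reverse_cons, List.reverse_nil, List.nil_append]
    rw [List.singleton_append, ih]
    congr 1
    apply List.map_congr_left
    intro j hj
    have : j < n := List.mem_range.mp hj
    simp only [Function.comp_apply]
    omega

-- filtering a zip equals filtering by index over range.
lemma zip_filterMap_range {α β : Type} [Inhabited α] (h : α × α → Option β) :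
    ∀ (xs ys : List α), xs.length = ys.length →
      (xs.zip ys).filterMap h
        = (List.range xs.length).filterMap (fun j => h (xs[j]!, ys[j]!)) := by
  intro xs
  induction xs with
  | nil => simp
  | cons x xs ih =>
    intro ys hlen
    cases ys with
    | nil => simp at hlen
    | cons y ys =>
      have hxy := ih ys (by simpa using hlen)
      rw [List.zip_cons_cons, List.filterMap_cons, List.length_cons,
        List.range_succ_eq_map, List.filterMap_cons, List.filterMap_map]
      have hfun : ((fun j => h ((x :: xs)[j]!, (y :: ys)[j]!)) ∘ (· + 1))
          = fun j => h (xs[j]!, ys[j]!) := by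
        funext j; simp
      rw [hfun, hxy]
      cases hh : h (x, y) <;> simp [hh]

lemma getElem!_reverse (cs : List Char) (j : Nat) (hj : j < cs.length) :
    cs.reverse[j]! = cs[cs.length - 1 - j]! := by
  have hj' : j < cs.reverse.length := by simpa using hj
  rw [List.getElem!_eq_getElem?_getD, List.getElem!_eq_getElem?_getD,
    List.getElem?_eq_getElem hj', List.getElem?_eq_getElem (by omega)]
  simp [List.getElem_reverse]

-- ===== VERDICT (by name: the statement is the Claim_ definition above) =====
theorem process_string_spec : Claim_equal_process_string := by
  intro s _
  unfold Spec_process_string process_string process_string_alt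
  set cs := s.toList with hcs
  by_cases hlen : 2 ≤ cs.length ∧ cs.length ≤ 50
  · rw [if_neg (by simp [hlen]), if_neg (by simp [hlen])]
    refine congrArg String.ofList ?_
    set vs := "aeiouAEIOU".toList with hvs
    set n := cs.length with hn
    -- A's side equals the zip form
    have hA :
        (PySem.List.enumerate cs.reverse 1).filterMap
            (fun p => if p.1 ∉ (PySem.List.enumerate cs 0).filterMap
                (fun q => if q.2 ∈ vs then some (q.1 + 1) else none) then some p.2 else none)
          = (cs.zip cs.reverse).filterMap (fun p => if p.1 ∉ vs then some p.2 else none) := by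
      apply A_zip_lemma
      · simp
      · intro k hk
        rw [mem_positions]
        constructor
        · rintro ⟨m, hm, hmk, hv⟩
          have : m = k := by omega
          subst this
          rwa [List.getElem!_eq_getElem?_getD, List.getElem?_eq_getElem hm,
            Option.getD_some] at *
        · intro hv
          have hk' : k < cs.length := by simpa using hk
          refine ⟨k, hk', by ring, ?_⟩
          rwa [List.getElem!_eq_getElem?_getD, List.getElem?_eq_getElem hk',
            Option.getD_some] at hv
    rw [hA]
    -- B's side: loop = filterMap, then reverse = the zip form
    have hB :
        (List.range n).foldl
            (fun acc j => if cs[n - 1 - j]! ∉ vs then acc ++ [cs[j]!] else acc) ([] : List Char)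
          = (List.range n).filterMap
            (fun j => if cs[n - 1 - j]! ∉ vs then some cs[j]! else none) := by
      have := foldl_append_if' (fun j => cs[n - 1 - j]! ∉ vs)
        (fun j => cs[j]!) (List.range n) []
      rw [List.nil_append] at this
      exact this
    rw [hB, ← List.filterMap_reverse, reverse_range_eq_map, List.filterMap_map,
      zip_filterMap_range (fun p => if p.1 ∉ vs then some p.2 else none) cs cs.reverse (by simp)]
    apply List.filterMap_congr
    intro j hj
    have hj' : j < n := List.mem_range.mp hj
    have h1 : n - 1 - (n - 1 - j) = j := by omega
    simp only [Function.comp_apply, h1, getElem!_reverse cs j (by omega)]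
    rw [← hn]
  · simp [hlen]
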